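-- pv_equiv track=rewrite | github.com/yashbodhe/CodingNinja | Bit/PatternSum.py | check
-- ===== SOURCE A (Python) =====
-- def check(n,zero,one):
--     count0,count1 = 0,0
--     if n==0:count0=1
--     while (n):
--         if n & 1:
--         	count1 += 1
--         else:
--             count0 +=1
--         n >>= 1
--     if one==count1 and zero==count0:
--         return True
--     return False
-- ===== SOURCE B (Python) =====
-- def check(n, zero, one):
--     ones = bin(n).count('1')
--     zeros = 1 if n == 0 else n.bit_length() - ones
--     return zero == zeros and one == ones
-- ===== Notes on version B (the rewrite author's own statement) =====
-- stated objective: idiomatic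
-- what changed: Replaced A's bit-by-bit shifting loop counting zeros and ones with a closed-form computation from the popcount (bin(n).count('1')) and bit_length, keeping the n==0 case giving one zero bit.
import Mathlib
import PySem

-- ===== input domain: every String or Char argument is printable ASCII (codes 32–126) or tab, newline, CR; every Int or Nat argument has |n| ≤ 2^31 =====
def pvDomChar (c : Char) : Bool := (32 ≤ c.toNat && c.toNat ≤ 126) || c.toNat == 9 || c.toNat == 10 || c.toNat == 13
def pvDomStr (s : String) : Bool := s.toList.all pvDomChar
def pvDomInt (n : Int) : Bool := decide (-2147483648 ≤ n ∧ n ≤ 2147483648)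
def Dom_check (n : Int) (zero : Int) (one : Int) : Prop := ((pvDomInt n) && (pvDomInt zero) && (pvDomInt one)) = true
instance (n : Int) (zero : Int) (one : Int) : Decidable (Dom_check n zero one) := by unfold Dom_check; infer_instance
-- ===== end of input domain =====

-- B replaces A's bit-shifting loop by the closed form zeros = bit_length − popcount (idiomatic, no loop).
-- A diverges on negative n (Python's n >>= 1 never reaches 0), so Pre_ restricts to 0 ≤ n.

-- ===== PORT A =====
-- A's while loop: counts one bit per iteration, n halving each step (n ≥ 0 by Pre_).
def checkLoop (m : Nat) (c0 c1 : Int) : Int × Int :=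
  if m = 0 then (c0, c1)
  else if m % 2 = 1 then checkLoop (m / 2) c0 (c1 + 1)
  else checkLoop (m / 2) (c0 + 1) c1
termination_by m
decreasing_by all_goals exact Nat.div_lt_self (Nat.pos_of_ne_zero (by assumption)) (by norm_num)

def check (n : Int) (zero : Int) (one : Int) : Bool :=
  let count0 : Int := if n = 0 then 1 else 0
  let c := checkLoop n.toNat count0 0
  if one = c.2 && zero = c.1 then true else false

-- ===== PORT B =====
-- bin(n).count('1') for n ≥ 0: the popcount of n
def popcnt (m : Nat) : Nat :=
  if m = 0 then 0 else m % 2 + popcnt (m / 2)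
termination_by m
decreasing_by exact Nat.div_lt_self (Nat.pos_of_ne_zero (by assumption)) (by norm_num)

-- n.bit_length() for n ≥ 0
def bitlen (m : Nat) : Nat :=
  if m = 0 then 0 else bitlen (m / 2) + 1
termination_by m
decreasing_by exact Nat.div_lt_self (Nat.pos_of_ne_zero (by assumption)) (by norm_num)

def check_alt (n : Int) (zero : Int) (one : Int) : Bool :=
  let ones : Int := popcnt n.toNat
  let zeros : Int := if n = 0 then 1 else (bitlen n.toNat : Int) - ones
  decide (zero = zeros) && decide (one = ones)

-- ===== PRECONDITION & SPEC =====
-- Pre_ excludes negative n, on which A's while loop never terminates (Python right shift of a negative int).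
def Pre_check (n : Int) (zero : Int) (one : Int) : Prop := 0 ≤ n
instance (n : Int) (zero : Int) (one : Int) : Decidable (Pre_check n zero one) := by
  unfold Pre_check; infer_instance
def pvWitness_check : Int × Int × Int := (12, 2, 2)

def Spec_check (n : Int) (zero : Int) (one : Int) (out : Bool) : Prop := out = check_alt n zero one
instance (n : Int) (zero : Int) (one : Int) (out : Bool) : Decidable (Spec_check n zero one out) := by
  unfold Spec_check; infer_instance

-- ===== CLAIM =====
def Claim_equal_check : Prop := ∀ (n : Int) (zero : Int) (one : Int), Dom_check n zero one → Pre_check n zero one → Spec_check n zero one (check n zero one)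

-- ===== LEMMAS AND PROOFS =====

theorem checkLoop_closed (m : Nat) (c0 c1 : Int) :
    checkLoop m c0 c1 = (c0 + ((bitlen m : Int) - popcnt m), c1 + popcnt m) := by
  induction m, c0, c1 using checkLoop.induct with
  | case1 c0 c1 =>
    simp [checkLoop, bitlen, popcnt]
  | case2 m c0 c1 h h2 ih =>
    rw [checkLoop, if_neg h, if_pos h2, ih]
    conv_rhs => rw [popcnt, bitlen]
    simp only [if_neg h, h2, Prod.mk.injEq]
    constructor <;> push_cast <;> omega
  | case3 m c0 c1 h h2 ih =>
    have h2' : m % 2 = 0 := by omega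
    rw [checkLoop, if_neg h, if_neg h2, ih]
    conv_rhs => rw [popcnt, bitlen]
    simp only [if_neg h, h2', Prod.mk.injEq]
    constructor <;> push_cast <;> omega

-- ===== VERDICT =====
theorem check_spec : Claim_equal_check := by
  intro n zero one _ hpre
  unfold Spec_check
  simp only [check, check_alt, checkLoop_closed]
  by_cases h0 : n = 0
  · subst h0
    simp [popcnt, bitlen]
    by_cases hz : zero = 1 <;> by_cases ho : one = 0 <;> simp [hz, ho]
  · simp only [if_neg h0, zero_add]
    by_cases hz : zero = (bitlen n.toNat : Int) - (popcnt n.toNat : Int) <;>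
      by_cases ho : one = (popcnt n.toNat : Int) <;>
      simp [hz, ho]
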